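-- pv_equiv track=rewrite | github.com/n1ai/mseventeen | standalone/m17.py | _make_3bit_errors
-- ===== SOURCE A (Python) =====
-- def _make_3bit_errors(veclen=24):
--     """Return a list of all bitvectors with <= 3 bits as 1's.
--     This returns list of lists, each 24 bits long by default.
--     """
--     errorvecs = []
--     # all zeros
--     errorvecs.append(0)
--     # one 1
--     for i in range(veclen):
--         errorvecs.append(1 << i)
--     # two 1s
--     for i in range(veclen - 1):
--         for j in range(i + 1, veclen):
--             errorvecs.append((1 << i) | (1 << j))
--     # three 1s
--     for i in range(veclen  - 2):
--         for j in range(i + 1, veclen - 1):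
--             for k in range(j + 1, veclen):
--                 errorvecs.append((1 << i) | (1 << j) | (1 << k))
--     return errorvecs
-- ===== SOURCE B (Python) =====
-- def _combos(mask, start, r, veclen, bits, out):
--     if r == 0:
--         out.append(mask)
--     elif r == 1:
--         out.extend([mask | b for b in bits[start:]])
--     else:
--         for i in range(start, veclen):
--             _combos(mask | bits[i], i + 1, r - 1, veclen, bits, out)
--
--
-- def _make_3bit_errors(veclen=24):
--     """Return a list of all bitvectors with <= 3 bits as 1's."""
--     bits = [1 << i for i in range(veclen)]
--     out = []
--     for r in range(4):
--         _combos(0, 0, r, veclen, bits, out)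
--     return out
-- ===== Notes on version B (the rewrite author's own statement) =====
-- stated objective: alternative
-- what changed: A's four hardcoded blocks (zero, singles, nested pair loop, triply nested triple loop) become one loop over the set-bit count r in range(4) driving a single recursive generator over a precomputed bits table, whose last level is emitted as a bulk slice comprehension.
import Mathlib
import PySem

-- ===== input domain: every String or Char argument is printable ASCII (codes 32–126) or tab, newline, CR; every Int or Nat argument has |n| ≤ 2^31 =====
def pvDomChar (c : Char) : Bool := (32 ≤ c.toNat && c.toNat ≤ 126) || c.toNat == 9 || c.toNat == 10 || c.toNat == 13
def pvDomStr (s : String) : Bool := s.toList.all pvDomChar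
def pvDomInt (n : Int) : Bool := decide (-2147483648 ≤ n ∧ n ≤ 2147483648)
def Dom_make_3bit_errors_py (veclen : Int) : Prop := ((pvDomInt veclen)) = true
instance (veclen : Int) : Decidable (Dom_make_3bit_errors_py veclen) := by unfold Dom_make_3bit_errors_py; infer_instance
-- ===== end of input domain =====

-- B replaces A's four hardcoded enumeration blocks by one loop over the set-bit
-- count r driving a recursive generator over precomputed bits, with a bulk
-- slice-extend at the last level (objective: alternative, same asymptotic cost).

-- pvS i = Python's `1 << i` (used by both ports)
def pvS (i : Int) : Int := (1 : Int) <<< i.toNat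

-- ===== PORT A =====
def make_3bit_errors_py (veclen : Int) : List Int :=
  let ev : List Int := [(0 : Int)]
  let ev := (PySem.List.pyRange 0 veclen 1).foldl
    (fun acc i => acc ++ [pvS i]) ev
  let ev := (PySem.List.pyRange 0 (veclen - 1) 1).foldl
    (fun acc i =>
      (PySem.List.pyRange (i + 1) veclen 1).foldl
        (fun acc j =>
          acc ++ [PySem.Int.bor (pvS i) (pvS j)]) acc) ev
  let ev := (PySem.List.pyRange 0 (veclen - 2) 1).foldl
    (fun acc i =>
      (PySem.List.pyRange (i + 1) (veclen - 1) 1).foldl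
        (fun acc j =>
          (PySem.List.pyRange (j + 1) veclen 1).foldl
            (fun acc k =>
              acc ++ [PySem.Int.bor
                        (PySem.Int.bor (pvS i) (pvS j))
                        (pvS k)]) acc) acc) ev
  ev

-- ===== PORT B =====
-- pvCombos = Source B's helper `_combos`, with the list `out` that Python mutates in
-- place threaded through; `bits[i]` is ported with pyGetD (the index is always in
-- range: 0 ≤ start ≤ i < veclen = len(bits)); the `r < 0` branch is an
-- unreachable totality guard (Python only calls it with r ≥ 0).
def pvCombos (veclen : Int) (bits : List Int) (mask : Int) (start : Int) (r : Int)
    (out : List Int) : List Int :=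
  if r == 0 then out ++ [mask]
  else if r == 1 then
    out ++ (PySem.List.slice bits (some start)).map (fun b => PySem.Int.bor mask b)
  else if r < 0 then out
  else
    (PySem.List.pyRange start veclen 1).foldl
      (fun out i =>
        pvCombos veclen bits (PySem.Int.bor mask (PySem.List.pyGetD bits i 0)) (i + 1) (r - 1) out)
      out
termination_by r.toNat
decreasing_by simp_all; omega

def make_3bit_errors_py_alt (veclen : Int) : List Int :=
  let bits := (PySem.List.pyRange 0 veclen 1).map (fun i => pvS i)
  (PySem.List.pyRange 0 4 1).foldl
    (fun out r => pvCombos veclen bits 0 0 r out) []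

-- ===== PRECONDITION & SPEC =====
def Spec_make_3bit_errors_py (veclen : Int) (out : List Int) : Prop := out = make_3bit_errors_py_alt veclen
instance (veclen : Int) (out : List Int) : Decidable (Spec_make_3bit_errors_py veclen out) := by unfold Spec_make_3bit_errors_py; infer_instance

-- ===== CLAIM (what is proved, stated in full; the proofs are below) =====
def Claim_equal_make_3bit_errors_py : Prop := ∀ (veclen : Int), Dom_make_3bit_errors_py veclen → Spec_make_3bit_errors_py veclen (make_3bit_errors_py veclen)

-- ===== LEMMAS AND PROOFS =====

-- the list pvCombos appends: all masks `mask | (bits at r positions ≥ start)`, lexicographic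
def pvLevel (veclen : Int) (mask : Int) (start : Int) : Nat → List Int
  | 0 => [mask]
  | r + 1 =>
    (PySem.List.pyRange start veclen 1).flatMap
      (fun i => pvLevel veclen (PySem.Int.bor mask (pvS i)) (i + 1) r)

theorem pv_zero_bor (a : Int) : PySem.Int.bor 0 a = a := by
  rw [PySem.Int.bor_comm, PySem.Int.bor_zero]

theorem pv_tail_pyRange (a b : Int) :
    (PySem.List.pyRange a b 1).tail = PySem.List.pyRange (a + 1) b 1 := by
  rcases lt_or_ge a b with hab | hba
  · rw [PySem.List.pyRange_one_cons hab]
    rfl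
  · rw [PySem.List.pyRange_one_eq_nil hba, PySem.List.pyRange_one_eq_nil (by omega)]
    rfl

theorem pv_drop_pyRange (s : Nat) (a b : Int) :
    (PySem.List.pyRange a b 1).drop s = PySem.List.pyRange (a + s) b 1 := by
  induction s generalizing a with
  | zero => simp
  | succ s ih =>
    rw [List.drop_add_one_eq_tail_drop, ih, pv_tail_pyRange]
    congr 1
    push_cast
    ring

-- bits[start:] holds exactly the single-bit values at positions start..veclen-1
theorem pv_slice_bits (v st : Int) (h : 0 ≤ st) :
    PySem.List.slice ((PySem.List.pyRange 0 v 1).map (fun i => pvS i)) (some st)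
      = (PySem.List.pyRange st v 1).map (fun i => pvS i) := by
  rw [PySem.List.slice_from _ h, ← List.map_drop, pv_drop_pyRange,
      show (0 : Int) + (st.toNat : Int) = st by omega]

-- bits[i] = 1 << i for 0 ≤ i < veclen
theorem pv_bits_get (v i : Int) (h0 : 0 ≤ i) (h1 : i < v) :
    PySem.List.pyGetD ((PySem.List.pyRange 0 v 1).map (fun i => pvS i)) i 0 = pvS i := by
  rw [PySem.List.pyGetD_map_pyRange_of_nonneg _ _ _ _ h0 h1]

-- pvCombos only appends: it appends exactly pvLevel
theorem pvCombos_eq_level (v : Int) (n : Nat) :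
    ∀ (mask st : Int) (out : List Int), 0 ≤ st →
      pvCombos v ((PySem.List.pyRange 0 v 1).map (fun i => pvS i)) mask st (n : Int) out
        = out ++ pvLevel v mask st n := by
  induction n with
  | zero =>
    intro mask st out _
    rw [pvCombos]
    simp [pvLevel]
  | succ n ih =>
    intro mask st out hst
    rw [pvCombos]
    rcases n with _ | n
    · -- r = 1: the bulk slice-extend equals the level-1 flatMap
      norm_num
      rw [pv_slice_bits v st hst]
      show _ = pvLevel v mask st (0 + 1)
      rw [pvLevel]
      simp only [pvLevel, List.map_map]
      rw [← List.map_eq_flatMap]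
      rfl
    · -- r ≥ 2: the loop recurses; rewrite each call with the induction hypothesis
      have h0 : ¬((n + 1 + 1 : Nat) : Int) == 0 := by
        simp only [beq_iff_eq]; push_cast; omega
      have h1 : ¬((n + 1 + 1 : Nat) : Int) == 1 := by
        simp only [beq_iff_eq]; push_cast; omega
      have h2 : ¬((n + 1 + 1 : Nat) : Int) < 0 := by push_cast; omega
      simp only [h0, h1, Bool.false_eq_true, if_false, if_neg h2]
      have hc : ((n + 1 + 1 : Nat) : Int) - 1 = ((n + 1 : Nat) : Int) := by push_cast; ring
      simp only [hc]
      refine Eq.trans (PySem.List.foldl_congr_mem _ _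
        (fun out i => out ++ pvLevel v (PySem.Int.bor mask (pvS i)) (i + 1) (n + 1)) _ ?_) ?_
      · intro acc i hi
        have hmem := (PySem.List.mem_pyRange_one).mp hi
        rw [pv_bits_get v i (by omega) (by omega)]
        exact ih (PySem.Int.bor mask (pvS i)) (i + 1) acc (by omega)
      · rw [PySem.List.foldl_append_eq_flatMap]
        rfl

theorem pvLevel_zero (v st m : Int) : pvLevel v m st 0 = [m] := rfl

theorem pvLevel_one (v st m : Int) :
    pvLevel v m st 1 = (PySem.List.pyRange st v 1).map (fun i => PySem.Int.bor m (pvS i)) := by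
  show pvLevel v m st (0 + 1) = _
  rw [pvLevel]
  simp only [pvLevel]
  exact Eq.symm List.map_eq_flatMap

theorem pvLevel_two (v st m : Int) :
    pvLevel v m st 2 = (PySem.List.pyRange st v 1).flatMap
      (fun i => (PySem.List.pyRange (i + 1) v 1).map
        (fun j => PySem.Int.bor (PySem.Int.bor m (pvS i)) (pvS j))) := by
  show pvLevel v m st (1 + 1) = _
  rw [pvLevel]
  simp only [pvLevel_one]

theorem pvLevel_three (v st m : Int) :
    pvLevel v m st 3 = (PySem.List.pyRange st v 1).flatMap
      (fun i => (PySem.List.pyRange (i + 1) v 1).flatMap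
        (fun j => (PySem.List.pyRange (j + 1) v 1).map
          (fun k => PySem.Int.bor (PySem.Int.bor (PySem.Int.bor m (pvS i)) (pvS j)) (pvS k)))) := by
  show pvLevel v m st (2 + 1) = _
  rw [pvLevel]
  simp only [pvLevel_two]

-- dropping the last point of a range whose body is empty there
theorem pv_flatMap_drop_last (a b : Int) (f : Int → List Int) (h : f (b - 1) = []) :
    (PySem.List.pyRange a b 1).flatMap f = (PySem.List.pyRange a (b - 1) 1).flatMap f := by
  rcases le_or_gt b a with hba | hab
  · rw [PySem.List.pyRange_one_eq_nil hba, PySem.List.pyRange_one_eq_nil (by omega)]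
  · have hb : b = (b - 1) + 1 := by ring
    rw [hb, PySem.List.pyRange_one_succ_right (by omega)]
    simp [h]

-- ===== VERDICT (by name: the statement is the Claim_ definition above) =====
theorem make_3bit_errors_py_spec : Claim_equal_make_3bit_errors_py := by
  intro n _
  show make_3bit_errors_py n = make_3bit_errors_py_alt n
  -- pairs: B ranges over i < n where A stops at n-1; the extra point contributes []
  have hpairs :
      (PySem.List.pyRange 0 n 1).flatMap
        (fun i => (PySem.List.pyRange (i + 1) n 1).map
          (fun j => PySem.Int.bor (pvS i) (pvS j)))
      = (PySem.List.pyRange 0 (n - 1) 1).flatMap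
        (fun i => (PySem.List.pyRange (i + 1) n 1).map
          (fun j => PySem.Int.bor (pvS i) (pvS j))) := by
    apply pv_flatMap_drop_last
    rw [PySem.List.pyRange_one_eq_nil (by omega)]; rfl
  -- triples: clip the middle range to n-1, then the outer range to n-2
  have hinner : ∀ i : Int,
      (PySem.List.pyRange (i + 1) n 1).flatMap
        (fun j => (PySem.List.pyRange (j + 1) n 1).map
          (fun k => PySem.Int.bor (PySem.Int.bor (pvS i) (pvS j)) (pvS k)))
      = (PySem.List.pyRange (i + 1) (n - 1) 1).flatMap
        (fun j => (PySem.List.pyRange (j + 1) n 1).map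
          (fun k => PySem.Int.bor (PySem.Int.bor (pvS i) (pvS j)) (pvS k))) := by
    intro i
    apply pv_flatMap_drop_last
    rw [PySem.List.pyRange_one_eq_nil (by omega)]; rfl
  have htriples :
      (PySem.List.pyRange 0 n 1).flatMap
        (fun i => (PySem.List.pyRange (i + 1) n 1).flatMap
          (fun j => (PySem.List.pyRange (j + 1) n 1).map
            (fun k => PySem.Int.bor (PySem.Int.bor (pvS i) (pvS j)) (pvS k))))
      = (PySem.List.pyRange 0 (n - 2) 1).flatMap
        (fun i => (PySem.List.pyRange (i + 1) (n - 1) 1).flatMap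
          (fun j => (PySem.List.pyRange (j + 1) n 1).map
            (fun k => PySem.Int.bor (PySem.Int.bor (pvS i) (pvS j)) (pvS k)))) := by
    simp only [hinner]
    rw [pv_flatMap_drop_last 0 n _ (by
      rw [PySem.List.pyRange_one_eq_nil (by omega)]; rfl)]
    rw [pv_flatMap_drop_last 0 (n - 1) _ (by
      rw [PySem.List.pyRange_one_eq_nil (by omega)]; rfl)]
    rw [show n - 1 - 1 = n - 2 by ring]
  have hrange4 : PySem.List.pyRange 0 4 1 = [0, 1, 2, 3] := by decide
  have hc0 : ∀ out : List Int,
      pvCombos n ((PySem.List.pyRange 0 n 1).map (fun i => pvS i)) 0 0 0 out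
        = out ++ pvLevel n 0 0 0 :=
    fun out => by exact_mod_cast pvCombos_eq_level n 0 0 0 out le_rfl
  have hc1 : ∀ out : List Int,
      pvCombos n ((PySem.List.pyRange 0 n 1).map (fun i => pvS i)) 0 0 1 out
        = out ++ pvLevel n 0 0 1 :=
    fun out => by exact_mod_cast pvCombos_eq_level n 1 0 0 out le_rfl
  have hc2 : ∀ out : List Int,
      pvCombos n ((PySem.List.pyRange 0 n 1).map (fun i => pvS i)) 0 0 2 out
        = out ++ pvLevel n 0 0 2 :=
    fun out => by exact_mod_cast pvCombos_eq_level n 2 0 0 out le_rfl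
  have hc3 : ∀ out : List Int,
      pvCombos n ((PySem.List.pyRange 0 n 1).map (fun i => pvS i)) 0 0 3 out
        = out ++ pvLevel n 0 0 3 :=
    fun out => by exact_mod_cast pvCombos_eq_level n 3 0 0 out le_rfl
  rw [make_3bit_errors_py, make_3bit_errors_py_alt, hrange4]
  simp only [List.foldl_cons, List.foldl_nil]
  rw [hc0, hc1, hc2, hc3]
  simp only [pvLevel_zero, pvLevel_one, pvLevel_two, pvLevel_three, pv_zero_bor,
    List.nil_append, PySem.List.foldl_append_singleton_eq_map,
    PySem.List.foldl_append_eq_flatMap]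
  rw [hpairs, htriples]
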